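-- pv_equiv track=rewrite | github.com/starkworld/CodeSignals-Practice | palindromeRearranging.py | palindromeRearranging
-- ===== SOURCE A (Python) =====
-- def palindromeRearranging(inputString):
--     no_of_char = 256
--     cnt = [0] * no_of_char
--     for i in range(len(inputString)):
--         cnt[ord(inputString[i])] = cnt[ord(inputString[i])] + 1
--
--     odd = 0
--     for i in range(0, no_of_char):
--         if cnt[i] & 1:
--             odd = odd + 1
--         if odd > 1:
--             return False
--     return True
-- ===== SOURCE B (Python) =====
-- def palindromeRearranging(inputString):
--     odd = set()
--     for ch in inputString:
--         if ch in odd: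
--             odd.remove(ch)
--         else:
--             odd.add(ch)
--     return len(odd) <= 1
-- ===== Notes on version B (the rewrite author's own statement) =====
-- stated objective: idiomatic
-- what changed: Replaces the 256-slot frequency table plus a second 256-step parity scan with a single pass that toggles each character in a set of characters seen an odd number of times, returning len(odd) <= 1.
import Mathlib
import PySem

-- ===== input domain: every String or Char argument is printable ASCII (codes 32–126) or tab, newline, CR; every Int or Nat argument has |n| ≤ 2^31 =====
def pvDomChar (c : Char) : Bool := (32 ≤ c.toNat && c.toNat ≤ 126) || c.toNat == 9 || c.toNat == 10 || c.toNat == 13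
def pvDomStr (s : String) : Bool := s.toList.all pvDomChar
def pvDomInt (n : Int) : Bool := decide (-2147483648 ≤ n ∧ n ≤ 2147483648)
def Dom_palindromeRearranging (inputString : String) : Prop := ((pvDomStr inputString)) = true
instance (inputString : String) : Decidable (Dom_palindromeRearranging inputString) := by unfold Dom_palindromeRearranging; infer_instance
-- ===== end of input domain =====

-- B replaces A's 256-slot frequency table and second parity scan with one pass
-- toggling a set of odd-count characters (idiomatic; same return value on Dom).


-- ===== PORT A =====
-- counts are nonnegative Python ints, represented as Nat; under Dom every index
-- ord(c) ≤ 126 < 256 is in range, so List.set / List.getD are exact for cnt[i].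
def pvCntLoop : List Char → List Nat → List Nat
  | [], cnt => cnt
  | c :: rest, cnt => pvCntLoop rest (cnt.set c.toNat (cnt.getD c.toNat 0 + 1))

def pvOddLoop : List Nat → Nat → Bool
  | [], _ => true
  | x :: rest, odd =>
    let odd' := if x &&& 1 ≠ 0 then odd + 1 else odd
    if odd' > 1 then false else pvOddLoop rest odd'

def palindromeRearranging (inputString : String) : Bool :=
  pvOddLoop (pvCntLoop inputString.toList (List.replicate 256 0)) 0

-- ===== PORT B =====
-- Python's guarded `odd.remove(ch)` (never raises under the membership test) is Set.discard.
def pvStep (s : PySem.Set Char) (c : Char) : PySem.Set Char :=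
  if PySem.Set.contains s c then PySem.Set.discard s c else PySem.Set.add s c

def palindromeRearranging_alt (inputString : String) : Bool :=
  decide (PySem.Set.len (inputString.toList.foldl pvStep PySem.Set.empty) ≤ 1)

-- ===== PRECONDITION & SPEC =====
def Spec_palindromeRearranging (inputString : String) (out : Bool) : Prop := out = palindromeRearranging_alt inputString
instance (inputString : String) (out : Bool) : Decidable (Spec_palindromeRearranging inputString out) := by unfold Spec_palindromeRearranging; infer_instance

-- ===== CLAIM (what is proved, stated in full; the proofs are below) =====
def Claim_equal_palindromeRearranging : Prop := ∀ (inputString : String), Dom_palindromeRearranging inputString → Spec_palindromeRearranging inputString (palindromeRearranging inputString)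

-- ===== LEMMAS AND PROOFS =====

theorem pvCntLoop_length (l : List Char) (cnt : List Nat) :
    (pvCntLoop l cnt).length = cnt.length := by
  induction l generalizing cnt with
  | nil => rfl
  | cons c rest ih => simp [pvCntLoop, ih]

theorem pvCntLoop_getD (l : List Char) (cnt : List Nat) (i : Nat)
    (h : ∀ c ∈ l, c.toNat < cnt.length) :
    (pvCntLoop l cnt).getD i 0 = cnt.getD i 0 + l.countP (fun c => decide (c.toNat = i)) := by
  induction l generalizing cnt with
  | nil => simp [pvCntLoop]
  | cons c rest ih =>
    have hc : c.toNat < cnt.length := h c (List.mem_cons_self ..)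
    have hr : ∀ d ∈ rest, d.toNat < (cnt.set c.toNat (cnt.getD c.toNat 0 + 1)).length := by
      intro d hd; simpa using h d (List.mem_cons_of_mem _ hd)
    rw [pvCntLoop, ih _ hr]
    have hset : (cnt.set c.toNat (cnt.getD c.toNat 0 + 1)).getD i 0 =
        if i = c.toNat then cnt.getD c.toNat 0 + 1 else cnt.getD i 0 := by
      rcases eq_or_ne i c.toNat with h1 | h1
      · subst h1
        rw [if_pos rfl, List.getD_eq_getElem _ _ (by simpa using hc)]
        simp [hc]
      · rw [if_neg h1]
        simp only [List.getD_eq_getElem?_getD, List.getElem?_set]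
        rw [if_neg (fun hh => h1 hh.symm)]
    rw [hset, List.countP_cons]
    by_cases hic : i = c.toNat
    · simp [hic, eq_comm]
      omega
    · simp [hic, eq_comm]

theorem pvOddLoop_eq (l : List Nat) (odd : Nat) (h : odd ≤ 1) :
    pvOddLoop l odd = decide (odd + l.countP (fun x => decide (x % 2 = 1)) ≤ 1) := by
  induction l generalizing odd with
  | nil => simp [pvOddLoop]; omega
  | cons x rest ih =>
    rw [pvOddLoop]
    rcases Nat.mod_two_eq_zero_or_one x with hx | hx
    · have h1 : ¬ (x &&& 1 ≠ 0) := by simp [Nat.and_one_is_mod, hx]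
      rw [if_neg h1, if_neg (show ¬ odd > 1 by omega), ih odd h, List.countP_cons]
      simp [hx]
    · have h1 : (x &&& 1 ≠ 0) := by simp [Nat.and_one_is_mod, hx]
      rw [if_pos h1, List.countP_cons]
      by_cases ho : odd = 0
      · subst ho
        rw [if_neg (show ¬ (0 + 1 : Nat) > 1 by omega), ih (0 + 1) (by omega)]
        rw [Bool.eq_iff_iff]
        simp only [decide_eq_true_eq, hx]
        simp
      · have ho1 : odd = 1 := by omega
        subst ho1
        rw [if_pos (show (1 + 1 : Nat) > 1 by omega)]
        symm
        rw [decide_eq_false_iff_not]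
        simp [hx]

-- characterisation of B's toggle set: after the fold it holds exactly the
-- characters whose membership parity differs from the start set by the count in l
theorem pvToggle_inv (l : List Char) (s : PySem.Set Char) (hs : s.Nodup) :
    (l.foldl pvStep s).Nodup ∧
      ∀ c, c ∈ l.foldl pvStep s ↔ (c ∈ s ↔ ¬ Odd (l.count c)) := by
  induction l generalizing s with
  | nil =>
    refine ⟨hs, fun c => ?_⟩
    simp
  | cons x rest ih =>
    have hs' : (pvStep s x).Nodup := by
      simp only [pvStep]
      split_ifs
      · exact List.Nodup.filter _ hs
      · exact PySem.Set.nodup_add s x hs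
    obtain ⟨hn, hm⟩ := ih (pvStep s x) hs'
    refine ⟨by simpa [List.foldl_cons] using hn, fun c => ?_⟩
    rw [List.foldl_cons, hm c]
    have hmem : c ∈ pvStep s x ↔ (if c = x then c ∉ s else c ∈ s) := by
      by_cases hin : x ∈ s <;> by_cases hcx : c = x <;>
        simp [pvStep, PySem.Set.discard, PySem.Set.add, PySem.Set.contains,
              List.mem_filter, hin, hcx]
    rw [hmem]
    by_cases hcx : c = x
    · subst hcx
      rw [if_pos rfl, List.count_cons]
      simp only [BEq.rfl, if_pos]
      rw [Nat.odd_add_one]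
      by_cases h1 : c ∈ s <;> by_cases h2 : Odd (rest.count c) <;> simp [h1, h2]
    · rw [if_neg hcx]
      have hxc : (x == c) = false := beq_eq_false_iff_ne.mpr (Ne.symm hcx)
      rw [List.count_cons, hxc]
      simp

theorem char_toNat_inj : Function.Injective Char.toNat := by
  intro a b h
  exact Char.ext (by exact_mod_cast UInt32.toNat_inj.mp h)

theorem countP_code_eq_count (l : List Char) (c : Char) :
    l.countP (fun x => decide (x.toNat = c.toNat)) = l.count c := by
  rw [List.count]
  apply List.countP_congr
  intro x _
  simp only [decide_eq_true_eq, beq_iff_eq]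
  exact ⟨fun h => char_toNat_inj h, fun h => by rw [h]⟩

-- main bridge: the number of odd slots in A's table equals the size of B's toggle set
theorem main_bridge (l : List Char) (hdom : ∀ c ∈ l, c.toNat < 256) :
    (List.range 256).countP
        (fun i => decide ((l.countP (fun c => decide (c.toNat = i))) % 2 = 1)) =
      (l.foldl pvStep PySem.Set.empty).length := by
  obtain ⟨hnd, hmem⟩ := pvToggle_inv l PySem.Set.empty (by simp [PySem.Set.empty])
  have hmem' : ∀ c, c ∈ l.foldl pvStep PySem.Set.empty ↔ Odd (l.count c) := by
    intro c
    rw [hmem c]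
    simp [PySem.Set.empty]
  have hperm : List.Perm
      ((List.range 256).filter
        (fun i => decide ((l.countP (fun c => decide (c.toNat = i))) % 2 = 1)))
      ((l.foldl pvStep PySem.Set.empty).map Char.toNat) := by
    rw [List.perm_ext_iff_of_nodup (List.nodup_range.filter _) (hnd.map char_toNat_inj)]
    intro i
    simp only [List.mem_filter, List.mem_range, List.mem_map, decide_eq_true_eq]
    constructor
    · rintro ⟨hi, hqi⟩
      have hpos : 0 < l.countP (fun c => decide (c.toNat = i)) := by
        rcases Nat.eq_zero_or_pos (l.countP (fun c => decide (c.toNat = i))) with h0 | hp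
        · rw [h0] at hqi; omega
        · exact hp
      obtain ⟨c, hcl, hci⟩ := List.countP_pos_iff.mp hpos
      have hci' : c.toNat = i := by simpa using hci
      refine ⟨c, ?_, hci'⟩
      rw [hmem' c, Nat.odd_iff, ← countP_code_eq_count l c, hci']
      exact hqi
    · rintro ⟨c, hcT, hci⟩
      have hodd : Odd (l.count c) := (hmem' c).mp hcT
      have hcl : c ∈ l := by
        by_contra hno
        rw [List.count_eq_zero_of_not_mem hno] at hodd
        simp at hodd
      refine ⟨hci ▸ hdom c hcl, ?_⟩
      rw [← hci, countP_code_eq_count l c]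
      exact Nat.odd_iff.mp hodd
  rw [List.countP_eq_length_filter, hperm.length_eq, List.length_map]

theorem cnt_eq_map (l : List Char) (hdom : ∀ c ∈ l, c.toNat < 256) :
    pvCntLoop l (List.replicate 256 0) =
      (List.range 256).map (fun i => l.countP (fun c => decide (c.toNat = i))) := by
  apply List.ext_getElem
  · rw [pvCntLoop_length, List.length_replicate, List.length_map, List.length_range]
  · intro i h1 h2
    have hi : i < 256 := by
      rw [pvCntLoop_length, List.length_replicate] at h1; exact h1
    have hgd := pvCntLoop_getD l (List.replicate 256 0) i
      (by intro c hc; rw [List.length_replicate]; exact hdom c hc)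
    rw [List.getD_eq_getElem _ _ h1] at hgd
    have hrep : (List.replicate 256 (0 : Nat)).getD i 0 = 0 := by
      rw [List.getD_eq_getElem?_getD, List.getElem?_replicate]
      split <;> rfl
    rw [hrep, Nat.zero_add] at hgd
    rw [List.getElem_map, List.getElem_range, hgd]

-- ===== VERDICT (by name: the statement is the Claim_ definition above) =====
theorem palindromeRearranging_spec : Claim_equal_palindromeRearranging := by
  intro s hdom
  unfold Spec_palindromeRearranging palindromeRearranging palindromeRearranging_alt
  have hdom' : ∀ c ∈ s.toList, c.toNat < 256 := by
    intro c hc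
    have := (List.all_eq_true.mp hdom) c hc
    simp only [pvDomChar, Bool.or_eq_true, Bool.and_eq_true, decide_eq_true_eq, beq_iff_eq]
      at this
    omega
  rw [cnt_eq_map s.toList hdom', pvOddLoop_eq _ 0 (by omega), List.countP_map]
  have hcomp : ((fun x => decide (x % 2 = 1)) ∘
      fun i => s.toList.countP (fun c => decide (c.toNat = i)))
      = fun i => decide (s.toList.countP (fun c => decide (c.toNat = i)) % 2 = 1) := rfl
  rw [hcomp, main_bridge s.toList hdom', Nat.zero_add]
  rw [Bool.eq_iff_iff]
  simp only [decide_eq_true_eq, PySem.Set.len]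
  exact ⟨fun h => by exact_mod_cast h, fun h => by exact_mod_cast h⟩
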